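-- pv_equiv track=rewrite | github.com/Diogogrosario/FEUP-FPRO | RE11/override.py | override
-- ===== SOURCE A (Python) =====
-- def override(l1, l2):
--     for i in l2:
--         for index,j in enumerate(l1):
--             if i[0] == j[0]:
--                 l1[index] = i
--             else:
--                 l1.append(i)
--     return sorted(set(l1))
-- ===== SOURCE B (Python) =====
-- def override(l1, l2):
--     last = dict(l2)
--     kept = {t for t in l1 if t[0] not in last}
--     return sorted(kept | set(last.items()))
-- ===== Notes on version B (the rewrite author's own statement) =====
-- stated objective: faster
-- what changed: B replaces A's rescan-the-growing-list loops with one dict keyed by first component (last l2 entry per key) plus a filter of l1, then sorts once; A mutates l1 in place while B does not (return values agree outside D_).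
-- intended difference: When l1 is empty and l2 is not, A's inner loop never runs so A drops l2 entirely and returns [], while B returns the sorted last-per-key entries of l2, which is the intended merge result. — e.g. on override([], [(1, 2)]): A returns [], B returns [(1, 2)]
import Mathlib
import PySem

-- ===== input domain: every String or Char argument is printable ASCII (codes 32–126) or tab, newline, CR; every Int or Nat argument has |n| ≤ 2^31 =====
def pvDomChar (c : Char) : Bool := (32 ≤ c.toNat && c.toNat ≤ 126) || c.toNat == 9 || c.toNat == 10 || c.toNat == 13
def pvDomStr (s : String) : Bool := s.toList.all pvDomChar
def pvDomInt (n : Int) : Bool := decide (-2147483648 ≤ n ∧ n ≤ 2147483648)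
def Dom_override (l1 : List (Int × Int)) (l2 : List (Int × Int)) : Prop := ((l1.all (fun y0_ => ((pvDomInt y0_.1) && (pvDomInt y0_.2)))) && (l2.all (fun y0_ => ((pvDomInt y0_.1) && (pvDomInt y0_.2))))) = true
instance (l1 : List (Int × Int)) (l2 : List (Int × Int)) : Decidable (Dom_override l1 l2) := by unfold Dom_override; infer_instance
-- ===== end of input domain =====

-- B rebuilds the result from a dict keyed by first component instead of A's quadratic
-- rescan-and-append loops; equivalence is about the RETURN value only (A mutates l1 in place).

-- ===== PORT A =====
-- Python's inner `for index, j in enumerate(l1)` reads l1 by increasing index while the body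
-- mutates it (replaces l1[index] / appends), so it is ported as index recursion over the
-- evolving list, exactly CPython's list-iterator behaviour.
def overrideInner (i : Int × Int) (a : Array (Int × Int)) (idx : Nat) : Array (Int × Int) :=
  if h : idx < a.size then
    if i.1 == a[idx].1 then
      overrideInner i (a.set idx i) (idx + 1)
    else
      overrideInner i (a.push i) (idx + 1)
  else a
termination_by (((a.toList.drop idx).countP fun j => decide (j.1 ≠ i.1)), a.size - idx)
decreasing_by
  · have hl : idx < a.toList.length := by simpa using h
    have hs : (a.set idx i).toList = a.toList.set idx i := by simp
    have hd : (a.toList.set idx i).drop (idx + 1) = a.toList.drop (idx + 1) := by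
      rw [List.drop_set]; simp
    have hc : ((a.set idx i).toList.drop (idx + 1)).countP (fun j => decide (j.1 ≠ i.1))
        = (a.toList.drop idx).countP (fun j => decide (j.1 ≠ i.1)) := by
      rw [hs, hd, List.drop_eq_getElem_cons hl, List.countP_cons]
      simp_all
    rw [hc]
    exact Prod.Lex.right _ (by simp; omega)
  · apply Prod.Lex.left
    rename_i hne
    have hl : idx < a.toList.length := by simpa using h
    have hd : (a.push i).toList.drop (idx + 1) = a.toList.drop (idx + 1) ++ [i] := by
      rw [Array.toList_push, List.drop_append_of_le_length (by omega)]
    have hp : decide (a.toList[idx].1 ≠ i.1) = true := by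
      simp only [ne_eq, decide_eq_true_eq]
      intro q
      exact hne (by simp_all [Array.getElem_toList])
    rw [hd, List.countP_append, List.drop_eq_getElem_cons hl, List.countP_cons,
      List.countP_cons, hp]
    simp

-- sorted(set(...)): Python compares int pairs lexicographically, i.e. sorted2 on fst then snd
def override (l1 : List (Int × Int)) (l2 : List (Int × Int)) : List (Int × Int) :=
  let final := l2.foldl (fun acc i => overrideInner i acc 0) l1.toArray
  PySem.List.sorted2 (PySem.Set.ofList final.toList) (fun p => p.1) (fun p => p.2) false

-- ===== PORT B =====
def override_alt (l1 : List (Int × Int)) (l2 : List (Int × Int)) : List (Int × Int) :=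
  let last := PySem.Dict.ofList l2
  let kept := PySem.Set.ofList (l1.filter fun t => !(last.contains t.1))
  PySem.List.sorted2 (PySem.Set.union kept last.items) (fun p => p.1) (fun p => p.2) false

-- ===== PRECONDITION & SPEC =====
-- When l1 is empty and l2 is not, A's inner loop never runs so A drops l2 entirely and
-- returns [], while B returns the sorted last-per-key entries of l2 — the intended merge.
def D_override (l1 : List (Int × Int)) (l2 : List (Int × Int)) : Prop := l1 = [] ∧ l2 ≠ []
instance (l1 : List (Int × Int)) (l2 : List (Int × Int)) : Decidable (D_override l1 l2) := by unfold D_override; infer_instance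

def Spec_override (l1 : List (Int × Int)) (l2 : List (Int × Int)) (out : List (Int × Int)) : Prop := ¬ D_override l1 l2 → out = override_alt l1 l2
instance (l1 : List (Int × Int)) (l2 : List (Int × Int)) (out : List (Int × Int)) : Decidable (Spec_override l1 l2 out) := by unfold Spec_override; infer_instance

def pvDiffWitness_override : (List (Int × Int)) × (List (Int × Int)) := ([], [(1, 2)])
def pvDiffWitnessOut_override : (List (Int × Int)) × (List (Int × Int)) := ([], [(1, 2)])

-- ===== CLAIM (what is proved, stated in full; the proofs are below) =====
def Claim_unchanged_override : Prop := ∀ (l1 : List (Int × Int)) (l2 : List (Int × Int)), Dom_override l1 l2 → Spec_override l1 l2 (override l1 l2)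
def Claim_changed_override : Prop := Dom_override (pvDiffWitness_override.1) (pvDiffWitness_override.2) ∧ D_override (pvDiffWitness_override.1) (pvDiffWitness_override.2) ∧ override (pvDiffWitness_override.1) (pvDiffWitness_override.2) = pvDiffWitnessOut_override.1 ∧ override_alt (pvDiffWitness_override.1) (pvDiffWitness_override.2) = pvDiffWitnessOut_override.2 ∧ pvDiffWitnessOut_override.1 ≠ pvDiffWitnessOut_override.2
def Claim_exact_override : Prop := ∀ (l1 : List (Int × Int)) (l2 : List (Int × Int)), Dom_override l1 l2 → D_override l1 l2 → override l1 l2 ≠ override_alt l1 l2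

-- ===== LEMMAS AND PROOFS =====

theorem overrideInner_eq (i : Int × Int) (a : Array (Int × Int)) (idx : Nat) :
    (overrideInner i a idx).toList =
      a.toList.take idx ++ ((a.toList.drop idx).map fun j => if j.1 = i.1 then i else j) ++
        List.replicate ((a.toList.drop idx).countP fun j => decide (j.1 ≠ i.1)) i := by
  fun_induction overrideInner i a idx with
  | case1 a idx h hm ih =>
    have hl : idx < a.toList.length := by simpa using h
    have hm' : a[idx].1 = i.1 := (eq_of_beq hm).symm
    have hset : (a.set idx i).toList = a.toList.set idx i := by simp
    have hdrop : a.toList.drop idx = a[idx] :: a.toList.drop (idx + 1) := by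
      rw [List.drop_eq_getElem_cons hl, Array.getElem_toList]
    have e1 : (a.toList.set idx i).take (idx + 1) = a.toList.take idx ++ [i] := by
      rw [List.take_set, List.take_add_one, List.getElem?_eq_getElem hl,
        Option.toList_some, List.set_append_right _ _ (by rw [List.length_take]; omega)]
      simp only [List.length_take, Nat.min_eq_left (Nat.le_of_lt hl), Nat.sub_self,
        List.set_cons_zero]
    have e2 : (a.toList.set idx i).drop (idx + 1) = a.toList.drop (idx + 1) := by
      rw [List.drop_set, if_pos (Nat.lt_succ_self idx)]
    have e4 : (if a[idx].1 = i.1 then i else a[idx]) = i := if_pos hm'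
    have e5 : decide (a[idx].1 ≠ i.1) = false := by simp [hm']
    rw [ih, hset, e1, e2, hdrop, List.map_cons, List.countP_cons]
    simp only [e4, e5, Bool.false_eq_true, if_false, Nat.add_zero, List.nil_append,
      List.append_assoc, List.cons_append]
  | case2 a idx h hm ih =>
    have hl : idx < a.toList.length := by simpa using h
    have hm' : ¬ a[idx].1 = i.1 := fun q => hm (by simp [q])
    have hpush : (a.push i).toList = a.toList ++ [i] := by simp
    have hdrop : a.toList.drop idx = a[idx] :: a.toList.drop (idx + 1) := by
      rw [List.drop_eq_getElem_cons hl, Array.getElem_toList]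
    have e1 : (a.toList ++ [i]).take (idx + 1) = a.toList.take idx ++ [a[idx]] := by
      rw [List.take_append_of_le_length (by omega), List.take_add_one,
        List.getElem?_eq_getElem hl, Option.toList_some, Array.getElem_toList]
    have e2 : (a.toList ++ [i]).drop (idx + 1) = a.toList.drop (idx + 1) ++ [i] :=
      List.drop_append_of_le_length (by omega)
    have e4 : (if a[idx].1 = i.1 then i else a[idx]) = a[idx] := if_neg hm'
    have e5 : decide (a[idx].1 ≠ i.1) = true := by simp [hm']
    rw [ih, hpush, e1, e2, hdrop, List.map_cons, List.map_append, List.map_cons,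
      List.map_nil, List.countP_cons, List.countP_append, List.countP_cons, List.countP_nil]
    simp only [e4, e5, if_true, List.replicate_succ, decide_eq_true_eq,
      List.append_assoc, List.cons_append, List.nil_append]
    simp [List.replicate_succ]
  | case3 a idx h =>
    have hle : a.toList.length ≤ idx := by simp at h ⊢; omega
    have hd : a.toList.drop idx = [] := List.drop_eq_nil_of_le hle
    rw [List.take_of_length_le hle, hd]
    simp

theorem overrideInner_zero_ne_nil (i : Int × Int) (a : Array (Int × Int)) (h : a.toList ≠ []) :
    (overrideInner i a 0).toList ≠ [] := by
  rw [overrideInner_eq]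
  simp [h]

theorem mem_overrideInner_zero (i : Int × Int) (a : Array (Int × Int)) (h : a.toList ≠ [])
    (x : Int × Int) :
    x ∈ (overrideInner i a 0).toList ↔ x = i ∨ (x ∈ a.toList ∧ x.1 ≠ i.1) := by
  rw [overrideInner_eq]
  simp only [List.take_zero, List.drop_zero, List.nil_append, List.mem_append,
    List.mem_map, List.mem_replicate]
  constructor
  · rintro (⟨y, hy, hfy⟩ | ⟨-, rfl⟩)
    · by_cases hk : y.1 = i.1
      · left; rw [if_pos hk] at hfy; exact hfy.symm
      · right; rw [if_neg hk] at hfy; exact hfy ▸ ⟨hy, hfy ▸ hk⟩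
    · exact Or.inl rfl
  · rintro (rfl | ⟨hx, hk⟩)
    · obtain ⟨y, hy⟩ := List.exists_mem_of_ne_nil a.toList h
      by_cases hk : y.1 = x.1
      · exact Or.inl ⟨y, hy, if_pos hk⟩
      · refine Or.inr ⟨?_, rfl⟩
        have : (List.countP (fun j => decide (j.1 ≠ x.1)) a.toList) ≠ 0 := by
          rw [Ne, List.countP_eq_zero]
          push_neg
          exact ⟨y, hy, by simpa using hk⟩
        exact this
    · exact Or.inl ⟨x, hx, if_neg hk⟩

theorem get?_foldl_insert (rest : List (Int × Int)) (d : PySem.Dict Int Int) (k : Int) :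
    (rest.foldl (fun acc p => acc.insert p.1 p.2) d).get? k =
      match (PySem.Dict.ofList rest).get? k with
      | some v => some v
      | none => d.get? k := by
  induction rest generalizing d with
  | nil => simp [PySem.Dict.ofList, PySem.Dict.update, PySem.Dict.get?_empty]
  | cons p rest ih =>
    have hof : PySem.Dict.ofList (p :: rest)
        = rest.foldl (fun acc q => acc.insert q.1 q.2) (PySem.Dict.empty.insert p.1 p.2) := by
      simp [PySem.Dict.ofList, PySem.Dict.update]
    rw [List.foldl_cons, ih, hof, ih]
    rcases hr : (PySem.Dict.ofList rest).get? k with _ | v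
    · simp only [PySem.Dict.get?_insert]
      split_ifs <;> simp [PySem.Dict.get?_empty]
    · rfl

theorem get?_ofList_cons (i : Int × Int) (rest : List (Int × Int)) (k : Int) :
    (PySem.Dict.ofList (i :: rest)).get? k =
      match (PySem.Dict.ofList rest).get? k with
      | some v => some v
      | none => if k = i.1 then some i.2 else none := by
  have hof : PySem.Dict.ofList (i :: rest)
      = rest.foldl (fun acc q => acc.insert q.1 q.2) (PySem.Dict.empty.insert i.1 i.2) := by
    simp [PySem.Dict.ofList, PySem.Dict.update]
  rw [hof, get?_foldl_insert]
  rcases hr : (PySem.Dict.ofList rest).get? k with _ | v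
  · simp [PySem.Dict.get?_insert, PySem.Dict.get?_empty]
  · rfl

theorem mem_foldl_overrideInner (l2 : List (Int × Int)) (a : Array (Int × Int))
    (h : a.toList ≠ []) (x : Int × Int) :
    x ∈ (l2.foldl (fun acc i => overrideInner i acc 0) a).toList ↔
      (x ∈ a.toList ∧ (PySem.Dict.ofList l2).get? x.1 = none) ∨
        (PySem.Dict.ofList l2).get? x.1 = some x.2 := by
  induction l2 generalizing a with
  | nil => simp [PySem.Dict.ofList, PySem.Dict.update, PySem.Dict.get?_empty]
  | cons i rest ih =>
    rw [List.foldl_cons, ih _ (overrideInner_zero_ne_nil i a h),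
      mem_overrideInner_zero i a h, get?_ofList_cons]
    rcases hr : (PySem.Dict.ofList rest).get? x.1 with _ | v
    · by_cases hk : x.1 = i.1
      · simp [hr, hk]
        exact ⟨fun hxi => by rw [hxi], fun h2 => Prod.ext hk h2.symm⟩
      · simp [hr, hk]
        exact fun hxi => absurd (congrArg Prod.fst hxi) hk
    · simp [hr]

theorem sorted2_eq_sorted_lex (xs : List (Int × Int)) :
    PySem.List.sorted2 xs (fun p => p.1) (fun p => p.2) false =
      PySem.List.sorted xs (fun p => (toLex p : Int ×ₗ Int)) false := by
  have hb : (fun a b : Int × Int =>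
        decide (a.1 < b.1) || (!decide (b.1 < a.1) && decide (a.2 < b.2)))
      = fun a b : Int × Int => decide ((toLex a : Int ×ₗ Int) < toLex b) := by
    funext a b
    by_cases h1 : a.1 < b.1
    · simp [Prod.Lex.lt_iff, h1]
    · by_cases h2 : b.1 < a.1
      · simp [Prod.Lex.lt_iff, h1, h2, (ne_of_lt h2).symm]
      · have he : a.1 = b.1 := le_antisymm (not_lt.mp h2) (not_lt.mp h1)
        simp [Prod.Lex.lt_iff, h1, he]
  rw [PySem.List.sorted_eq_foldl_insertBy]
  exact congrArg (fun b => List.foldl (fun acc x => PySem.List.insertBy b x acc) [] xs) hb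

theorem foldl_overrideInner_nil (l2 : List (Int × Int)) (a : Array (Int × Int))
    (ha : a.toList = []) :
    (l2.foldl (fun acc i => overrideInner i acc 0) a).toList = [] := by
  induction l2 generalizing a with
  | nil => exact ha
  | cons i r ih =>
    refine ih _ ?_
    rw [overrideInner_eq, ha]; rfl

theorem override_nil (l2 : List (Int × Int)) : override [] l2 = [] := by
  show PySem.List.sorted2 (PySem.Set.ofList
      ((l2.foldl (fun acc i => overrideInner i acc 0)
        ((#[] : Array (Int × Int)))).toList)) (fun p => p.1) (fun p => p.2) false = []
  rw [foldl_overrideInner_nil l2 _ rfl]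
  rfl

theorem override_eq_alt_of_ne_nil (l1 l2 : List (Int × Int)) (hne : l1 ≠ []) :
    override l1 l2 = override_alt l1 l2 := by
  unfold override override_alt
  simp only []
  rw [sorted2_eq_sorted_lex, sorted2_eq_sorted_lex]
  apply PySem.List.sorted_eq_sorted_of_perm _ _ _ (fun p q h => toLex.injective h)
  rw [List.perm_ext_iff_of_nodup (PySem.Set.nodup_ofList _)
    (PySem.Set.nodup_union _ _ (PySem.Set.nodup_ofList _))]
  intro x
  rw [PySem.Set.mem_ofList, mem_foldl_overrideInner l2 _ (by simpa using hne),
    PySem.Set.mem_union,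
    PySem.Set.mem_ofList, List.mem_filter]
  have hitems : x ∈ (PySem.Dict.ofList l2).items ↔
      (PySem.Dict.ofList l2).get? x.1 = some x.2 := by
    rw [PySem.Dict.get?_eq_some_iff_mem_items _ _ _ (PySem.Dict.nodup_keys_ofList l2)]
  have hcont : (!(PySem.Dict.ofList l2).contains x.1) = true ↔
      (PySem.Dict.ofList l2).get? x.1 = none := by
    rw [PySem.Dict.contains_eq_isSome_get?]
    simp [Option.isSome_eq_false_iff, Option.isNone_iff_eq_none]
  rw [hitems, and_congr_right_iff.mpr (fun _ => hcont)]

theorem override_alt_nil_ne_nil (l2 : List (Int × Int)) (h : l2 ≠ []) :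
    override_alt [] l2 ≠ [] := by
  obtain ⟨i, rest, rfl⟩ := List.exists_cons_of_ne_nil h
  have hget : ∃ v, (PySem.Dict.ofList (i :: rest)).get? i.1 = some v := by
    rw [get?_ofList_cons]
    rcases hr : (PySem.Dict.ofList rest).get? i.1 with _ | v
    · exact ⟨i.2, by simp⟩
    · exact ⟨v, rfl⟩
  obtain ⟨v, hv⟩ := hget
  have hmem : (i.1, v) ∈ (PySem.Dict.ofList (i :: rest)).items :=
    PySem.Dict.mem_items_of_get?_eq_some _ hv
  intro hcontra
  unfold override_alt at hcontra
  simp only [] at hcontra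
  have hmemu : (i.1, v) ∈ PySem.Set.union
      (PySem.Set.ofList (([] : List (Int × Int)).filter
        fun t => !(PySem.Dict.ofList (i :: rest)).contains t.1))
      (PySem.Dict.ofList (i :: rest)).items :=
    (PySem.Set.mem_union _ _ _).mpr (Or.inr hmem)
  have hperm := PySem.List.sorted2_perm
    ((PySem.Set.ofList (([] : List (Int × Int)).filter
        fun t => !(PySem.Dict.ofList (i :: rest)).contains t.1)).union
      (PySem.Dict.ofList (i :: rest)).items)
    (fun p : Int × Int => p.1) (fun p => p.2) false
  rw [hcontra] at hperm
  exact absurd (hperm.mem_iff.mpr hmemu) (List.not_mem_nil)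

-- ===== VERDICT (by name: the statement is the Claim_ definition above) =====
theorem override_spec : Claim_unchanged_override := by
  unfold Claim_unchanged_override Spec_override D_override
  intro l1 l2 _ hnd
  cases l1 with
  | nil =>
    have hl2 : l2 = [] := by
      by_contra h
      exact hnd ⟨rfl, h⟩
    subst hl2
    decide
  | cons a t => exact override_eq_alt_of_ne_nil (a :: t) l2 (List.cons_ne_nil a t)

theorem override_changed : Claim_changed_override := by
  unfold Claim_changed_override
  exact ⟨by decide, by decide, override_nil _, by decide, by decide⟩

theorem override_tight : Claim_exact_override := by
  unfold Claim_exact_override D_override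
  rintro l1 l2 _ ⟨rfl, h2⟩
  rw [override_nil]
  exact fun h => override_alt_nil_ne_nil l2 h2 h.symm
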